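-- pv_equiv track=rewrite | github.com/sovereignagents/heist | scripts/annotate_headers.py | remove_legacy_path_comment
-- ===== SOURCE A (Python) =====
-- def remove_legacy_path_comment(lines: list[str], relpath: str) -> list[str]:
--     """
--     Remove old single-line path comment that exactly matches "# <relpath>".
--     """
--     legacy = f"# {relpath}"
--     out: list[str] = []
--     removed = False
--     for line in lines:
--         if not removed and line.strip() == legacy:
--             removed = True
--             continue
--         out.append(line)
--     return out
-- ===== SOURCE B (Python) =====
-- def remove_legacy_path_comment(lines: list[str], relpath: str) -> list[str]:
--     legacy = f"# {relpath}"
--     i = next((i for i, ln in enumerate(lines) if ln.strip() == legacy), None)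
--     if i is None:
--         return list(lines)
--     return lines[:i] + lines[i + 1:]
-- ===== Notes on version B (the rewrite author's own statement) =====
-- stated objective: simpler
-- what changed: Replaces the filter loop with a boolean 'removed' flag by locating the index of the first matching line and splicing it out via slicing; the no-match path returns a fresh copy.
import Mathlib
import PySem

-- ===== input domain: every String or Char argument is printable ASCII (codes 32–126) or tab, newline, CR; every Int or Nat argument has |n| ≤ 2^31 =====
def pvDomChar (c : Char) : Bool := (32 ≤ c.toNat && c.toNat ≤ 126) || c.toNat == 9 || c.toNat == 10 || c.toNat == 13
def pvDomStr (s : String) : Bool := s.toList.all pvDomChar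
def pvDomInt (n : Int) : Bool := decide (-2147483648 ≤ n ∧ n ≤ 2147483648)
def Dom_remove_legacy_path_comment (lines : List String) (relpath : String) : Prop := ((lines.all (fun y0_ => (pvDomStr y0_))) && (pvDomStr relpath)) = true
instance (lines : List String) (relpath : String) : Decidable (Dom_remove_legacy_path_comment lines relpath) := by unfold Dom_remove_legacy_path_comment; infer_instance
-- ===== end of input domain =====

-- B replaces A's flag-carrying filter loop by a first-match index search plus list splicing (objective: simpler).


-- ===== PORT A =====
-- A's loop step: state (out, removed); skip the first line whose strip equals legacy.
def pvStepA (legacy : String) (st : List String × Bool) (line : String) : List String × Bool :=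
  if !st.2 && (PySem.Str.strip line == legacy) then (st.1, true)
  else (st.1 ++ [line], st.2)

def remove_legacy_path_comment (lines : List String) (relpath : String) : List String :=
  let legacy : String := "# " ++ relpath
  (lines.foldl (pvStepA legacy) ([], false)).1

-- ===== PORT B =====
def remove_legacy_path_comment_alt (lines : List String) (relpath : String) : List String :=
  let legacy : String := "# " ++ relpath
  match lines.findIdx? (fun ln => PySem.Str.strip ln == legacy) with
  | none => lines
  | some i => lines.take i ++ lines.drop (i + 1)

-- ===== PRECONDITION & SPEC =====
def Spec_remove_legacy_path_comment (lines : List String) (relpath : String) (out : List String) : Prop := out = remove_legacy_path_comment_alt lines relpath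
instance (lines : List String) (relpath : String) (out : List String) : Decidable (Spec_remove_legacy_path_comment lines relpath out) := by unfold Spec_remove_legacy_path_comment; infer_instance

-- ===== CLAIM (what is proved, stated in full; the proofs are below) =====
def Claim_equal_remove_legacy_path_comment : Prop := ∀ (lines : List String) (relpath : String), Dom_remove_legacy_path_comment lines relpath → Spec_remove_legacy_path_comment lines relpath (remove_legacy_path_comment lines relpath)

-- ===== LEMMAS AND PROOFS =====
theorem pvFoldA_true (legacy : String) (ls : List String) : ∀ acc,
    List.foldl (pvStepA legacy) (acc, true) ls = (acc ++ ls, true) := by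
  induction ls with
  | nil => simp
  | cons l tl ih => intro acc; simp [pvStepA, ih]

theorem pvFoldA_false (legacy : String) (ls : List String) : ∀ acc,
    (List.foldl (pvStepA legacy) (acc, false) ls).1 =
      acc ++ (match ls.findIdx? (fun ln => PySem.Str.strip ln == legacy) with
              | none => ls
              | some i => ls.take i ++ ls.drop (i + 1)) := by
  induction ls with
  | nil => simp
  | cons l tl ih =>
    intro acc
    by_cases h : (PySem.Str.strip l == legacy) = true
    · simp [pvStepA, h, List.findIdx?_cons, pvFoldA_true]
    · simp only [List.foldl_cons, pvStepA, Bool.not_false, Bool.true_and, if_neg h]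
      rw [ih (acc ++ [l])]
      simp only [List.findIdx?_cons, if_neg h]
      cases tl.findIdx? (fun ln => PySem.Str.strip ln == legacy) <;> simp

-- ===== VERDICT (by name: the statement is the Claim_ definition above) =====
theorem remove_legacy_path_comment_spec : Claim_equal_remove_legacy_path_comment := by
  intro lines relpath _
  unfold Spec_remove_legacy_path_comment remove_legacy_path_comment remove_legacy_path_comment_alt
  rw [pvFoldA_false]
  simp
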